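-- pv_equiv track=rewrite | github.com/Hyper-Node/word_sense_induction | my_lib/text_processing.py | apply_context_window
-- ===== SOURCE A (Python) =====
-- def apply_context_window(split_sentence, words_to_recognize, window_size, use_filter=True):
--     """
--     Applies a context window around a word in a sentence and gives back
--     an array of the words which are within the context windows
--     :param split_sentence:
--     :param words_to_recognize:
--     :param window_size:
--     :return:
--     """
--
--     found_word_index = -1
--     # search for word
--     for word_index, word in enumerate(split_sentence):
--         if word in words_to_recognize:
--             found_word_index = word_index
--
--     # returns in special case word to recognize is not found
--     if use_filter:
--         if found_word_index == -1:
--             return []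
--     else:
--         return split_sentence
--
--
--     # remove follow up words to recognized word
--     words_with_cut_end = split_sentence[:found_word_index + 1 + window_size]
--
--     # remove starting words
--     start_index = found_word_index - window_size
--     if start_index < 0:
--         start_index = 0
--
--     words_start_end = words_with_cut_end[start_index:]
--
--     final_split = words_start_end[:]  # make copy of list for safety
--     return final_split
-- ===== SOURCE B (Python) =====
-- def apply_context_window(split_sentence, words_to_recognize, window_size, use_filter=True):
--     if not use_filter:
--         return split_sentence
--     # index the sentence once: word -> position of its last occurrence
--     last_pos = {}
--     for i, word in enumerate(split_sentence):
--         last_pos[word] = i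
--     # the last recognized word sits at the greatest last-occurrence position of any target
--     found = -1
--     for w in words_to_recognize:
--         if w in last_pos and last_pos[w] > found:
--             found = last_pos[w]
--     if found == -1:
--         return []
--     return split_sentence[max(found - window_size, 0):found + 1 + window_size]
-- ===== Notes on version B (the rewrite author's own statement) =====
-- stated objective: faster
-- what changed: Instead of A's forward scan over the sentence with a per-word list-membership test and two successive slices plus a copy, B builds a word-to-last-position dictionary in one pass over the sentence, then loops over words_to_recognize taking the maximum recorded position, and returns one combined slice.
import Mathlib
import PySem

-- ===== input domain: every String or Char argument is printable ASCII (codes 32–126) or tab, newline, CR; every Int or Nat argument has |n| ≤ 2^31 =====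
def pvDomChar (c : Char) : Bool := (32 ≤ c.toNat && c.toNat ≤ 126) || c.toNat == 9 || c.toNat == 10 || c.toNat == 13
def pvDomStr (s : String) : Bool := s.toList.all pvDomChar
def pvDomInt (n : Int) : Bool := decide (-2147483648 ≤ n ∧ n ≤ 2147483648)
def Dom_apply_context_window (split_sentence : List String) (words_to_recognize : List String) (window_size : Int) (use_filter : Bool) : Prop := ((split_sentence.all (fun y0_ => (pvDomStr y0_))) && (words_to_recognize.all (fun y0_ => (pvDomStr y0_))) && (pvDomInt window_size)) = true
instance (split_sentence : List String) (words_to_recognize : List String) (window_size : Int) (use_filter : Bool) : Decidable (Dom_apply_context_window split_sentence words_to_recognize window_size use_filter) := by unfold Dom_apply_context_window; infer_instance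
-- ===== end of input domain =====

-- B replaces A's forward sentence scan with a per-word list-membership test (and two slices plus a copy) by a
-- word→last-position dictionary built in one pass, a max over words_to_recognize, and one combined slice.

-- ===== PORT A =====
def apply_context_window (split_sentence : List String) (words_to_recognize : List String) (window_size : Int) (use_filter : Bool) : List String :=
  -- forward scan keeping the last matching index
  let found_word_index : Int :=
    (PySem.List.enumerate split_sentence 0).foldl
      (fun acc p => if p.2 ∈ words_to_recognize then p.1 else acc) (-1)
  if use_filter then
    if found_word_index = -1 then []
    else
      let words_with_cut_end := PySem.List.slice split_sentence none (some (found_word_index + 1 + window_size))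
      let start_index := found_word_index - window_size
      let start_index := if start_index < 0 then 0 else start_index
      let words_start_end := PySem.List.slice words_with_cut_end (some start_index) none
      let final_split := words_start_end  -- list copy: same value
      final_split
  else
    split_sentence

-- ===== PORT B =====
def apply_context_window_alt (split_sentence : List String) (words_to_recognize : List String) (window_size : Int) (use_filter : Bool) : List String :=
  if !use_filter then split_sentence
  else
    -- one pass over the sentence: word -> last position
    let last_pos : PySem.Dict String Int :=
      (PySem.List.enumerate split_sentence 0).foldl (fun d p => d.insert p.2 p.1) PySem.Dict.empty
    -- loop over the targets, taking the greatest recorded position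
    let found : Int :=
      words_to_recognize.foldl
        (fun acc w => match last_pos.get? w with
                      | some i => if i > acc then i else acc
                      | none => acc) (-1)
    if found = -1 then []
    else PySem.List.slice split_sentence (some (max (found - window_size) 0)) (some (found + 1 + window_size))

-- ===== PRECONDITION & SPEC =====
def Spec_apply_context_window (split_sentence : List String) (words_to_recognize : List String) (window_size : Int) (use_filter : Bool) (out : List String) : Prop := out = apply_context_window_alt split_sentence words_to_recognize window_size use_filter
instance (split_sentence : List String) (words_to_recognize : List String) (window_size : Int) (use_filter : Bool) (out : List String) : Decidable (Spec_apply_context_window split_sentence words_to_recognize window_size use_filter out) := by unfold Spec_apply_context_window; infer_instance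

-- ===== CLAIM =====
def Claim_equal_apply_context_window : Prop := ∀ (split_sentence : List String) (words_to_recognize : List String) (window_size : Int) (use_filter : Bool), Dom_apply_context_window split_sentence words_to_recognize window_size use_filter → Spec_apply_context_window split_sentence words_to_recognize window_size use_filter (apply_context_window split_sentence words_to_recognize window_size use_filter)

-- ===== LEMMAS AND PROOFS =====

-- abbreviations used only by the proofs
def acwAfound (ss wtr : List String) : Int :=
  (PySem.List.enumerate ss 0).foldl (fun acc p => if p.2 ∈ wtr then p.1 else acc) (-1)

def acwDict (ss : List String) : PySem.Dict String Int :=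
  (PySem.List.enumerate ss 0).foldl (fun d p => d.insert p.2 p.1) PySem.Dict.empty

def acwStep (d : PySem.Dict String Int) : Int → String → Int :=
  fun acc w => match d.get? w with
               | some i => if i > acc then i else acc
               | none => acc

-- the dictionary after one more sentence word
theorem acwDict_append (ss : List String) (x : String) :
    acwDict (ss ++ [x]) = (acwDict ss).insert x (ss.length : Int) := by
  simp [acwDict, PySem.List.enumerate_append, List.foldl_append, PySem.List.enumerate_cons,
    PySem.List.enumerate_nil]

-- every value stored in the dictionary is a valid index
theorem acwDict_values_bound (ss : List String) (w : String) (i : Int)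
    (h : (acwDict ss).get? w = some i) : 0 ≤ i ∧ i < (ss.length : Int) := by
  induction ss using List.reverseRecOn with
  | nil => simp [acwDict, PySem.List.enumerate_nil, PySem.Dict.get?_empty] at h
  | append_singleton ss x ih =>
    rw [acwDict_append, PySem.Dict.get?_insert] at h
    simp only [List.length_append, List.length_cons, List.length_nil]
    split at h
    · cases h; omega
    · have := ih h; omega

-- the max-fold hits M when M bounds everything and is attained (or is the accumulator)
theorem acwFold_max (d : PySem.Dict String Int) (l : List String) (a M : Int)
    (ha : a ≤ M)
    (hb : ∀ w ∈ l, ∀ i, d.get? w = some i → i ≤ M)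
    (hc : (∃ w ∈ l, d.get? w = some M) ∨ a = M) :
    l.foldl (acwStep d) a = M := by
  induction l generalizing a with
  | nil =>
    rcases hc with ⟨w, hw, _⟩ | rfl
    · exact absurd hw List.not_mem_nil
    · rfl
  | cons w t ih =>
    simp only [List.foldl_cons]
    rcases hc with ⟨v, hv, hval⟩ | rfl
    · rcases List.mem_cons.mp hv with rfl | hvt
      · -- head attains M
        apply ih
        · simp [acwStep, hval]; omega
        · intro u hu i hi; exact hb u (List.mem_cons_of_mem _ hu) i hi
        · right
          simp only [acwStep, hval]
          have : M ≤ M := le_refl M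
          split <;> omega
      · apply ih
        · cases h : d.get? w with
          | none => simpa [acwStep, h] using ha
          | some i =>
            have := hb w (List.mem_cons_self) i h
            simp only [acwStep, h]; split <;> omega
        · intro u hu i hi; exact hb u (List.mem_cons_of_mem _ hu) i hi
        · exact Or.inl ⟨v, hvt, hval⟩
    · apply ih
      · cases h : d.get? w with
        | none => simp [acwStep, h]
        | some i =>
          have := hb w (List.mem_cons_self) i h
          simp only [acwStep, h]; split <;> omega
      · intro u hu i hi; exact hb u (List.mem_cons_of_mem _ hu) i hi
      · right
        cases h : d.get? w with
        | none => simp [acwStep, h]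
        | some i =>
          have := hb w (List.mem_cons_self) i h
          simp only [acwStep, h]; split <;> omega

-- fold congruence: lookups agree on every member
theorem acwFold_congr (d d' : PySem.Dict String Int) (l : List String) (a : Int)
    (h : ∀ w ∈ l, d.get? w = d'.get? w) :
    l.foldl (acwStep d) a = l.foldl (acwStep d') a := by
  induction l generalizing a with
  | nil => rfl
  | cons w t ih =>
    simp only [List.foldl_cons, acwStep, h w List.mem_cons_self]
    exact ih _ (fun u hu => h u (List.mem_cons_of_mem _ hu))

-- the two searches find the same index
theorem acwFound_eq (ss wtr : List String) :
    wtr.foldl (acwStep (acwDict ss)) (-1) = acwAfound ss wtr := by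
  induction ss using List.reverseRecOn with
  | nil =>
    simp only [acwAfound, PySem.List.enumerate_nil, List.foldl_nil]
    apply acwFold_max
    · exact le_refl _
    · intro w _ i hi
      simp [acwDict, PySem.List.enumerate_nil, PySem.Dict.get?_empty] at hi
    · exact Or.inr rfl
  | append_singleton ss x ih =>
    have hA : acwAfound (ss ++ [x]) wtr
        = if x ∈ wtr then (ss.length : Int) else acwAfound ss wtr := by
      simp only [acwAfound, PySem.List.enumerate_append, List.foldl_append,
        PySem.List.enumerate_cons, PySem.List.enumerate_nil, List.foldl_cons, List.foldl_nil]
      split <;> simp_all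
    rw [hA]
    by_cases hx : x ∈ wtr
    · simp only [hx, if_true]
      apply acwFold_max
      · have : (0:Int) ≤ ss.length := by positivity
        omega
      · intro w _ i hi
        have := acwDict_values_bound (ss ++ [x]) w i hi
        simp only [List.length_append, List.length_cons, List.length_nil] at this
        omega
      · left
        exact ⟨x, hx, by rw [acwDict_append]; exact PySem.Dict.get?_insert_self _ _ _⟩
    · simp only [hx, if_false]
      rw [← ih]
      apply acwFold_congr
      intro w hw
      rw [acwDict_append, PySem.Dict.get?_insert_of_ne]
      intro h; exact hx (h ▸ hw)

-- A's found index is -1 or a nonnegative position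
theorem acwAfound_cases (ss wtr : List String) :
    acwAfound ss wtr = -1 ∨ 0 ≤ acwAfound ss wtr := by
  induction ss using List.reverseRecOn with
  | nil => left; rfl
  | append_singleton ss x ih =>
    simp only [acwAfound, PySem.List.enumerate_append, List.foldl_append,
      PySem.List.enumerate_cons, PySem.List.enumerate_nil, List.foldl_cons, List.foldl_nil]
    by_cases hx : x ∈ wtr
    · right
      simp only [hx, if_true]
      positivity
    · simpa [hx, acwAfound] using ih

-- composing A's two slices into B's single slice (nonnegative start)
theorem acw_slice_slice (xs : List String) (a b : Int) (ha : 0 ≤ a) :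
    PySem.List.slice (PySem.List.slice xs none (some b)) (some a) none
      = PySem.List.slice xs (some a) (some b) := by
  obtain ⟨m, rfl⟩ : ∃ m : Nat, a = (m : Int) := ⟨a.toNat, (Int.toNat_of_nonneg ha).symm⟩
  simp only [PySem.List.slice, PySem.List.clampIdx_natCast, Nat.sub_zero, List.drop_zero,
    List.length_take]
  set cb := PySem.List.clampIdx xs.length b with hcb
  have hle : cb ≤ xs.length := PySem.List.clampIdx_le _ _
  rw [Nat.min_eq_left hle, List.drop_take, List.take_take, Nat.min_self]
  by_cases hm : m ≤ cb
  · congr 1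
    · omega
    · congr 1
      omega
  · have h1 : cb - min m cb = 0 := by omega
    have h2 : cb - min m xs.length = 0 := by omega
    simp [h1, h2]

-- ===== VERDICT =====
theorem apply_context_window_spec : Claim_equal_apply_context_window := by
  intro ss wtr w uf _
  unfold Spec_apply_context_window apply_context_window apply_context_window_alt
  cases uf with
  | false => simp
  | true =>
    simp only [Bool.not_true, if_true, Bool.false_eq_true, if_false]
    rw [show (PySem.List.enumerate ss 0).foldl (fun d p => d.insert p.2 p.1) PySem.Dict.empty
          = acwDict ss from rfl]
    rw [show (fun (acc : Int) (w : String) =>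
          match (acwDict ss).get? w with
          | some i => if i > acc then i else acc
          | none => acc) = acwStep (acwDict ss) from rfl]
    rw [acwFound_eq]
    rw [show (PySem.List.enumerate ss 0).foldl
          (fun acc p => if p.2 ∈ wtr then p.1 else acc) (-1) = acwAfound ss wtr from rfl]
    by_cases hf : acwAfound ss wtr = -1
    · simp [hf]
    · simp only [hf, if_false]
      have h0 : 0 ≤ acwAfound ss wtr := (acwAfound_cases ss wtr).resolve_left hf
      have hstart : (if acwAfound ss wtr - w < 0 then (0:Int) else acwAfound ss wtr - w)
          = max (acwAfound ss wtr - w) 0 := by omega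
      rw [hstart, acw_slice_slice ss _ (acwAfound ss wtr + 1 + w) (by omega)]
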